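-- pv_equiv track=rewrite | github.com/kilian-hu/hackerrank-solutions | certificates/problem-solving-intermediate/maximum-subarray-value/solution.py | maxSubarrayValue
-- ===== SOURCE A (Python) =====
-- def maxSubarrayValue(arr):
--     max_p, max_n, sum_p, sum_n,size =0,0,0,0,len(arr)
--     for i in range(size):
--         val = arr[i] if i % 2 == 0 else -arr[i]
--         # for postive
--         if val < sum_p+val:
--             sum_p += val
--         else:
--             sum_p=val
--         if sum_p > max_p:
--             max_p = sum_p
--         # for negative
--         if val > sum_n+val:
--             sum_n += val
--         else:
--             sum_n=val
--         if sum_n < max_n: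
--             max_n = sum_n
--
--     return max_p**2 if max_p**2 > max_n**2 else max_n**2
-- ===== SOURCE B (Python) =====
-- def maxSubarrayValue(arr):
--     # Prefix-sum scan: running min/max prefix gives max/min subarray sum in one pass.
--     p = mn = mx = best_max = best_min = 0
--     for i, x in enumerate(arr):
--         p += x if i % 2 == 0 else -x
--         if p - mn > best_max:
--             best_max = p - mn
--         if p - mx < best_min:
--             best_min = p - mx
--         if p < mn:
--             mn = p
--         if p > mx:
--             mx = p
--     v = best_max if best_max > -best_min else -best_min
--     return v * v
-- ===== Notes on version B (the rewrite author's own statement) =====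
-- stated objective: alternative
-- what changed: Replaces A's two interleaved Kadane accumulators (best-sum-ending-here for both signs) by a single prefix-sum scan that keeps the running minimum and maximum prefix sum and derives the max/min subarray sums from them, returning max(best_max, -best_min) squared.
import Mathlib
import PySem

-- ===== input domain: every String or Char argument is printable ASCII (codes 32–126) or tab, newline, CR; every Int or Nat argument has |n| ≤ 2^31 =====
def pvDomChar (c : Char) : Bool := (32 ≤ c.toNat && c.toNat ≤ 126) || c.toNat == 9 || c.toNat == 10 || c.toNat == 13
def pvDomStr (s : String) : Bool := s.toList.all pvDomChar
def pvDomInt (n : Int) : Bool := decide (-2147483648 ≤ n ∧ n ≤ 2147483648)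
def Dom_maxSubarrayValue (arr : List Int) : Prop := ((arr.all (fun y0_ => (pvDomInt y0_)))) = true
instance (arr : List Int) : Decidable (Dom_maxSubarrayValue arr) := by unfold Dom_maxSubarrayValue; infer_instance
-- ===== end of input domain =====

-- B replaces A's double Kadane scan by a prefix-sum scan keeping the running min and max prefix (alternative decomposition, same O(n) cost).

-- ===== PORT A =====
-- A's loop body as a function of the state, the index and the element.
def pvStepA (st : Int × Int × Int × Int) (i x : Int) : Int × Int × Int × Int :=
  let val := if PySem.Int.mod i 2 = 0 then x else -x
  let sum_p := if val < st.2.2.1 + val then st.2.2.1 + val else val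
  let max_p := if sum_p > st.1 then sum_p else st.1
  let sum_n := if val > st.2.2.2 + val then st.2.2.2 + val else val
  let max_n := if sum_n < st.2.1 then sum_n else st.2.1
  (max_p, max_n, sum_p, sum_n)

-- B's loop body.
def pvStepB (st : Int × Int × Int × Int × Int) (ix : Int × Int) : Int × Int × Int × Int × Int :=
  let p := st.1 + (if PySem.Int.mod ix.1 2 = 0 then ix.2 else -ix.2)
  let bmax := if p - st.2.1 > st.2.2.2.1 then p - st.2.1 else st.2.2.2.1
  let bmin := if p - st.2.2.1 < st.2.2.2.2 then p - st.2.2.1 else st.2.2.2.2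
  let mn := if p < st.2.1 then p else st.2.1
  let mx := if p > st.2.2.1 then p else st.2.2.1
  (p, mn, mx, bmax, bmin)


def maxSubarrayValue (arr : List Int) : Int :=
  let size : Int := arr.length
  let s := (PySem.List.pyRange 0 size 1).foldl
    (fun st i => pvStepA st i (PySem.List.pyGetD arr i 0)) (0, 0, 0, 0)
  if s.1 ^ 2 > s.2.1 ^ 2 then s.1 ^ 2 else s.2.1 ^ 2

-- ===== PORT B =====
def maxSubarrayValue_alt (arr : List Int) : Int :=
  let s := (PySem.List.enumerate arr 0).foldl pvStepB (0, 0, 0, 0, 0)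
  let v := if s.2.2.2.1 > -s.2.2.2.2 then s.2.2.2.1 else -s.2.2.2.2
  v * v

-- ===== PRECONDITION & SPEC =====
def Spec_maxSubarrayValue (arr : List Int) (out : Int) : Prop := out = maxSubarrayValue_alt arr
instance (arr : List Int) (out : Int) : Decidable (Spec_maxSubarrayValue arr out) := by unfold Spec_maxSubarrayValue; infer_instance

-- ===== CLAIM (what is proved, stated in full; the proofs are below) =====
def Claim_equal_maxSubarrayValue : Prop := ∀ (arr : List Int), Dom_maxSubarrayValue arr → Spec_maxSubarrayValue arr (maxSubarrayValue arr)

-- ===== LEMMAS AND PROOFS =====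

-- Relation between A's state (max_p, max_n, sum_p, sum_n) and B's state (p, mn, mx, bmax, bmin).
def pvRel (a : Int × Int × Int × Int) (b : Int × Int × Int × Int × Int) : Prop :=
  a.1 = b.2.2.2.1 ∧ a.2.1 = b.2.2.2.2 ∧
  max a.2.2.1 0 = b.1 - b.2.1 ∧ min a.2.2.2 0 = b.1 - b.2.2.1 ∧
  0 ≤ a.1 ∧ a.2.1 ≤ 0

-- An index-loop 'for i in range(k, len(arr)): … i, arr[i] …' is a fold over enumerate of the dropped list.
theorem pvBridge {σ : Type} (arr : List Int) (f : σ → Int → Int → σ) :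
    ∀ (k : Nat) (init : σ),
      (PySem.List.pyRange k arr.length 1).foldl
          (fun s i => f s i (PySem.List.pyGetD arr i 0)) init
        = (PySem.List.enumerate (arr.drop k) k).foldl (fun s p => f s p.1 p.2) init := by
  intro k
  induction h : arr.length - k generalizing k with
  | zero =>
    intro init
    have hk : arr.length ≤ k := by omega
    rw [PySem.List.pyRange_one_eq_nil (by exact_mod_cast hk),
        List.drop_eq_nil_of_le hk, PySem.List.enumerate_nil]
    rfl
  | succ n ih =>
    intro init
    have hk : k < arr.length := by omega
    rw [PySem.List.pyRange_one_cons (by exact_mod_cast hk)]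
    have hget : PySem.List.pyGetD arr (k : Int) 0 = arr[k] := by
      simp [PySem.List.pyGetD_natCast, List.getElem?_eq_getElem hk]
    rw [List.drop_eq_getElem_cons hk, PySem.List.enumerate_cons]
    simp only [List.foldl_cons, hget]
    have : ((k : Int) + 1) = ((k + 1 : Nat) : Int) := by push_cast; ring
    rw [this, ih (k + 1) (by omega)]

theorem pvBridge0 {σ : Type} (arr : List Int) (f : σ → Int → Int → σ) (init : σ) :
    (PySem.List.pyRange 0 arr.length 1).foldl
        (fun s i => f s i (PySem.List.pyGetD arr i 0)) init
      = (PySem.List.enumerate arr 0).foldl (fun s p => f s p.1 p.2) init := by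
  have h := pvBridge arr f 0 init
  simpa using h

theorem pvRel_step (a : Int × Int × Int × Int) (b : Int × Int × Int × Int × Int)
    (ix : Int × Int) (h : pvRel a b) : pvRel (pvStepA a ix.1 ix.2) (pvStepB b ix) := by
  obtain ⟨h1, h2, h3, h4, h5, h6⟩ := h
  unfold pvStepA pvStepB pvRel
  by_cases hm : PySem.Int.mod ix.1 2 = 0 <;>
    simp only [hm, if_true, if_false] <;>
    (refine ⟨?_, ?_, ?_, ?_, ?_, ?_⟩ <;> dsimp only <;> split_ifs <;> omega)

theorem pvRel_fold (l : List (Int × Int)) :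
    ∀ a b, pvRel a b → pvRel (l.foldl (fun s p => pvStepA s p.1 p.2) a) (l.foldl pvStepB b) := by
  induction l with
  | nil => intro a b h; exact h
  | cons x xs ih =>
    intro a b h
    simp only [List.foldl_cons]
    exact ih _ _ (pvRel_step a b x h)

-- ===== VERDICT (by name: the statement is the Claim_ definition above) =====
theorem maxSubarrayValue_spec : Claim_equal_maxSubarrayValue := by
  intro arr _
  unfold Spec_maxSubarrayValue maxSubarrayValue maxSubarrayValue_alt
  simp only [pvBridge0 arr pvStepA]
  have h := pvRel_fold (PySem.List.enumerate arr 0) (0, 0, 0, 0) (0, 0, 0, 0, 0)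
    ⟨rfl, rfl, rfl, rfl, le_refl 0, le_refl 0⟩
  set sa := (PySem.List.enumerate arr 0).foldl (fun s p => pvStepA s p.1 p.2) (0, 0, 0, 0) with hsa
  set sb := (PySem.List.enumerate arr 0).foldl pvStepB (0, 0, 0, 0, 0) with hsb
  obtain ⟨h1, h2, _, _, h5, h6⟩ := h
  rw [← h1, ← h2]
  rcases lt_or_ge (-sa.2.1) sa.1 with hlt | hge
  · have hsq : sa.2.1 ^ 2 < sa.1 ^ 2 := by nlinarith
    rw [if_pos hsq, if_pos hlt]; ring
  · have hsq : ¬ (sa.2.1 ^ 2 < sa.1 ^ 2) := by nlinarith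
    rw [if_neg hsq, if_neg (not_lt.mpr hge)]; ring
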